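-- pv_equiv track=rewrite | github.com/thealper2/codewars-solutions | 7-kyu/clothes_size_number_converter.py | size_to_number
-- ===== SOURCE A (Python) =====
-- def size_to_number(size):
--     if not size:
--         return None
--
--     valid_chars = {'x', 's', 'm', 'l'}
--     for char in size:
--         if char not in valid_chars:
--             return None
--
--     if len(size) == 0:
--         return None
--
--     base = size[-1]
--     if base not in {'s', 'm', 'l'}:
--         return None
--
--     modifiers = size[:-1]
--     for mod in modifiers:
--         if mod != 'x':
--             return None
--
--     if len(size) > 1 and size[-2] in {'s', 'm', 'l'}:
--         return None
--
--     if base == 's':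
--         base_num = 36
--         num = base_num - 2 * len(modifiers)
--         return num
--     elif base == 'm':
--         if len(modifiers) > 0:
--             return None
--         return 38
--     elif base == 'l':
--         base_num = 40
--         num = base_num + 2 * len(modifiers)
--         return num
--     else:
--         return None
-- ===== SOURCE B (Python) =====
-- def size_to_number(size):
--     # Walk the string back-to-front with a running value: the last char seeds the
--     # value from a table, and each preceding 'x' shifts it 2 away from medium (38);
--     # anything else (or an 'x' over no/medium value) aborts with None.
--     r = None
--     for i in range(len(size) - 1, -1, -1):
--         c = size[i]
--         if i == len(size) - 1:
--             r = {'s': 36, 'm': 38, 'l': 40}.get(c)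
--         elif c == 'x' and r is not None and r != 38:
--             r = r - 2 if r < 38 else r + 2
--         else:
--             return None
--     return r
-- ===== Notes on version B (the rewrite author's own statement) =====
-- stated objective: alternative
-- what changed: Instead of A's staged whole-string validation (valid-char loop, base lookup, modifier loop, size[-2] check) plus a count-based formula, B makes one backward pass with a running value: the last letter seeds 36/38/40 from a table and each preceding 'x' shifts the value 2 further from 38, aborting on any other character or on a modified 'm'.
import Mathlib
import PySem

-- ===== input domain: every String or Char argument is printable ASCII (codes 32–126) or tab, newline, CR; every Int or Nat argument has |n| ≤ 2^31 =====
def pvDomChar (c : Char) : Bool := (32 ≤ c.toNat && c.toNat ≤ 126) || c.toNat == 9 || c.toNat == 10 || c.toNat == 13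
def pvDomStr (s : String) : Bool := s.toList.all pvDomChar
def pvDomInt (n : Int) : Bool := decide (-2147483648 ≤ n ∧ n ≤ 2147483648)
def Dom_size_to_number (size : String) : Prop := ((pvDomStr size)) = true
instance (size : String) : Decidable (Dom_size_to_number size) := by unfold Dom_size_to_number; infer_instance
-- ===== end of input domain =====

-- B replaces A's staged validation-plus-count-formula with one backward pass that
-- seeds a value from the last letter and shifts it 2 away from 38 per leading 'x'
-- (objective: alternative; same cost).

-- ===== PORT A =====
def size_to_number (size : String) : Option Int :=
  let cs := size.toList
  if cs = [] then none
  else if cs.any (fun c => !(c == 'x' || c == 's' || c == 'm' || c == 'l')) then none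
  else if cs.length = 0 then none
  else
    match cs.getLast? with
    | none => none
    | some base =>
      if !(base == 's' || base == 'm' || base == 'l') then none
      else
        let modifiers := cs.dropLast
        if modifiers.any (fun c => c != 'x') then none
        else if 1 < cs.length ∧ (PySem.List.pyGet? cs (-2) = some 's' ∨ PySem.List.pyGet? cs (-2) = some 'm' ∨ PySem.List.pyGet? cs (-2) = some 'l') then none
        else if base == 's' then some (36 - 2 * (modifiers.length : Int))
        else if base == 'm' then
          (if 0 < modifiers.length then none else some 38)
        else if base == 'l' then some (40 + 2 * (modifiers.length : Int))
        else none

-- ===== PORT B =====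
-- one loop iteration for a non-final character c with running value r
def pvStep (r : Option Int) (c : Char) : Option Int :=
  if c = 'x' ∧ r ≠ none ∧ r ≠ some 38 then
    match r with
    | some v => if v < 38 then some (v - 2) else some (v + 2)
    | none => none
  else none

def size_to_number_alt (size : String) : Option Int :=
  -- the Python loop runs i from len-1 down to 0: the last char seeds r, the rest fold
  match size.toList.reverse with
  | [] => none
  | last :: rest =>
    let r0 : Option Int :=
      if last = 's' then some 36 else if last = 'm' then some 38
      else if last = 'l' then some 40 else none
    rest.foldl pvStep r0

-- ===== PRECONDITION & SPEC =====
def Spec_size_to_number (size : String) (out : Option Int) : Prop := out = size_to_number_alt size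
instance (size : String) (out : Option Int) : Decidable (Spec_size_to_number size out) := by unfold Spec_size_to_number; infer_instance

-- ===== CLAIM (what is proved, stated in full; the proofs are below) =====
def Claim_equal_size_to_number : Prop := ∀ (size : String), Dom_size_to_number size → Spec_size_to_number size (size_to_number size)

-- ===== LEMMAS AND PROOFS =====

-- proof-only closed form both ports are reduced to
def specB (cs : List Char) : Option Int :=
  match cs.getLast? with
  | none => none
  | some base =>
    if ¬(base = 's' ∨ base = 'm' ∨ base = 'l') then none
    else if cs.dropLast ≠ List.replicate (cs.length - 1) 'x' then none
    else
      let n : Int := (cs.length : Int) - 1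
      if base = 's' then some (36 - 2 * n)
      else if base = 'l' then some (40 + 2 * n)
      else if n = 0 then some 38 else none

theorem any_ne_x_false_iff (ys : List Char) :
    ys.any (fun c => c != 'x') = false ↔ ys = List.replicate ys.length 'x' := by
  simp [List.any_eq_false, List.eq_replicate_iff]

theorem a_eq_spec (size : String) : size_to_number size = specB size.toList := by
  unfold size_to_number specB
  generalize size.toList = cs
  rcases List.eq_nil_or_concat cs with rfl | ⟨ys, b, rfl⟩
  · simp
  · simp only [List.concat_eq_append, List.getLast?_concat, List.dropLast_concat]
    have hlen1 : (ys ++ [b]).length - 1 = ys.length := by simp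
    rw [hlen1]
    by_cases hb : (b = 's' ∨ b = 'm' ∨ b = 'l')
    · by_cases hy : ys = List.replicate ys.length 'x'
      · have hany : (ys ++ [b]).any (fun c => !(c == 'x' || c == 's' || c == 'm' || c == 'l')) = false := by
          simp only [List.any_eq_false]
          intro c hc
          rcases List.mem_append.1 hc with h | h
          · rw [hy] at h
            simp only [List.mem_replicate] at h
            simp [h.2]
          · simp only [List.mem_singleton] at h
            subst h
            rcases hb with rfl | rfl | rfl <;> decide
        have hmod : ys.any (fun c => c != 'x') = false := (any_ne_x_false_iff ys).2 hy
        simp only [hany, hmod]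
        rw [if_neg (not_not_intro hb), if_neg (not_not_intro hy)]
        rcases Nat.eq_zero_or_pos ys.length with h0 | hpos
        · rcases List.length_eq_zero_iff.1 h0 with rfl
          rcases hb with rfl | rfl | rfl <;> decide
        · have hlen : (2 : Nat) ≤ (ys ++ [b]).length := by
            simp only [List.length_append, List.length_singleton]; omega
          have hlt : ys.length - 1 < ys.length := by omega
          have hget : PySem.List.pyGet? (ys ++ [b]) (-2) = some 'x' := by
            rw [PySem.List.pyGet?_neg_ofNat (ys ++ [b]) 2 (by omega) hlen]
            have h1 : (ys ++ [b]).length - 2 = ys.length - 1 := by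
              simp only [List.length_append, List.length_singleton]; omega
            have hall : ∀ x ∈ ys, x = 'x' := by
              intro x hxm
              rw [hy] at hxm
              exact (List.mem_replicate.1 hxm).2
            have hx : ys[ys.length - 1] = 'x' := hall _ (List.getElem_mem hlt)
            rw [h1, List.getElem?_append_left hlt, List.getElem?_eq_getElem hlt, hx]
          rcases hb with rfl | rfl | rfl <;>
            simp [hget, hpos, List.length_append] <;>
            first | omega | exact List.ne_nil_of_length_pos hpos
      · rw [if_neg (not_not_intro hb), if_pos hy]
        have hmod : (ys.any fun c => c != 'x') = true := by
          cases h : ys.any fun c => c != 'x'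
          · exact absurd ((any_ne_x_false_iff ys).1 h) hy
          · rfl
        split_ifs <;> simp_all
    · rw [if_pos hb]
      have hbb : (!(b == 's' || b == 'm' || b == 'l')) = true := by
        simp only [Bool.not_eq_eq_eq_not, Bool.not_true, Bool.or_eq_false_iff, beq_eq_false_iff_ne]
        exact ⟨⟨fun h => hb (Or.inl h), fun h => hb (Or.inr (Or.inl h))⟩, fun h => hb (Or.inr (Or.inr h))⟩
      split_ifs <;> simp_all

theorem foldl_step_none (xs : List Char) : xs.foldl pvStep none = none := by
  induction xs with
  | nil => rfl
  | cons c rest ih => simp [pvStep, ih]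

theorem foldl_step_not_rep (xs : List Char) (r : Option Int)
    (h : xs ≠ List.replicate xs.length 'x') : xs.foldl pvStep r = none := by
  induction xs generalizing r with
  | nil => exact absurd rfl h
  | cons c rest ih =>
    by_cases hc : c = 'x'
    · subst hc
      have hrest : rest ≠ List.replicate rest.length 'x' := by
        intro he
        apply h
        rw [List.length_cons, List.replicate_succ]
        exact congrArg (List.cons 'x') he
      rcases hr : pvStep r 'x' with _ | v
      · rw [List.foldl_cons, hr]; exact foldl_step_none rest
      · rw [List.foldl_cons, hr]; exact ih _ hrest
    · have : pvStep r c = none := by simp [pvStep, hc]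
      rw [List.foldl_cons, this]
      exact foldl_step_none rest

theorem foldl_step_low (n : Nat) (v : Int) (hv : v ≤ 36) :
    (List.replicate n 'x').foldl pvStep (some v) = some (v - 2 * n) := by
  induction n generalizing v with
  | zero => simp
  | succ k ih =>
    have h1 : pvStep (some v) 'x' = some (v - 2) := by
      simp only [pvStep]
      rw [if_pos ⟨trivial, Option.some_ne_none v, by intro h; injection h with h; omega⟩,
        if_pos (by omega)]
    rw [List.replicate_succ, List.foldl_cons, h1, ih (v - 2) (by omega)]
    congr 1; push_cast; ring

theorem foldl_step_high (n : Nat) (v : Int) (hv : 40 ≤ v) :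
    (List.replicate n 'x').foldl pvStep (some v) = some (v + 2 * n) := by
  induction n generalizing v with
  | zero => simp
  | succ k ih =>
    have h1 : pvStep (some v) 'x' = some (v + 2) := by
      simp only [pvStep]
      rw [if_pos ⟨trivial, Option.some_ne_none v, by intro h; injection h with h; omega⟩,
        if_neg (by omega)]
    rw [List.replicate_succ, List.foldl_cons, h1, ih (v + 2) (by omega)]
    congr 1; push_cast; ring

theorem foldl_step_mid (n : Nat) (hn : 0 < n) :
    (List.replicate n 'x').foldl pvStep (some 38) = none := by
  obtain ⟨k, rfl⟩ := Nat.exists_eq_add_of_lt hn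
  rw [Nat.zero_add, List.replicate_succ, List.foldl_cons]
  have : pvStep (some 38) 'x' = none := by simp [pvStep]
  rw [this]
  exact foldl_step_none _

theorem b_eq_spec (size : String) : size_to_number_alt size = specB size.toList := by
  unfold size_to_number_alt specB
  generalize size.toList = cs
  rcases List.eq_nil_or_concat cs with rfl | ⟨ys, b, rfl⟩
  · simp
  · simp only [List.concat_eq_append, List.getLast?_concat, List.dropLast_concat,
      List.reverse_append, List.reverse_singleton, List.singleton_append]
    have hlen1 : (ys ++ [b]).length - 1 = ys.length := by simp
    have hLi : ((ys ++ [b]).length : Int) - 1 = (ys.length : Int) := by simp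
    rw [hlen1]
    by_cases hy : ys = List.replicate ys.length 'x'
    · rw [if_neg (not_not_intro hy)]
      have hrev : ys.reverse = List.replicate ys.length 'x' := by
        calc ys.reverse = (List.replicate ys.length 'x').reverse := by rw [← hy]
          _ = List.replicate ys.length 'x' := List.reverse_replicate
      rw [hrev]
      by_cases hs : b = 's'
      · subst hs
        rw [if_pos rfl, if_neg (by simp), foldl_step_low ys.length 36 (by omega),
          if_pos rfl, hLi]
      · by_cases hm : b = 'm'
        · subst hm
          rw [if_neg (by decide), if_pos rfl, if_neg (by simp), if_neg (by decide),
            if_neg (by decide), hLi]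
          rcases Nat.eq_zero_or_pos ys.length with h0 | hpos
          · rw [h0]; simp
          · rw [foldl_step_mid ys.length hpos, if_neg (by omega)]
        · by_cases hl : b = 'l'
          · subst hl
            rw [if_neg (by decide), if_neg (by decide), if_pos rfl, if_neg (by simp),
              foldl_step_high ys.length 40 (by omega), if_neg (by decide), if_pos rfl, hLi]
          · rw [if_neg hs, if_neg hm, if_neg hl, if_pos (by tauto)]
            exact foldl_step_none _
    · have hne : ys.reverse ≠ List.replicate ys.reverse.length 'x' := by
        intro he
        apply hy
        have := congrArg List.reverse he
        rw [List.reverse_reverse, List.reverse_replicate] at this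
        simpa using this
      by_cases hb : (b = 's' ∨ b = 'm' ∨ b = 'l')
      · rw [if_neg (not_not_intro hb), if_pos hy, foldl_step_not_rep _ _ hne]
      · rw [if_pos hb, foldl_step_not_rep _ _ hne]

-- ===== VERDICT (by name: the statement is the Claim_ definition above) =====
theorem size_to_number_spec : Claim_equal_size_to_number := by
  intro size _
  unfold Spec_size_to_number
  rw [a_eq_spec, b_eq_spec]
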